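-- pv_equiv track=rewrite | github.com/EvilBoom/Recommendation-system | itemcf.py | mangli
-- ===== SOURCE A (Python) =====
-- def mangli(train,totl_items):
--     w=dict()
--     N=dict()
--     for item in totl_items:
--         w[item]=dict()
--         for item_ in totl_items:
--             w[item][item_]=0
--     for user,items in train.items():
--         for item in items:
--             if item not in N.keys():
--                 N[item]=0
--             N[item]+=1
--             for item_ in items:
--                 if item_ != item:
--                     w[item][item_]+=1
--     return w,N
-- ===== SOURCE B (Python) =====
-- def mangli(train, totl_items):
--     # One pass over users builds per-user count dicts and the global item
--     # frequencies N; the co-occurrence matrix is then constructed directly in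
--     # closed form: w[x][y] = sum over users of count_u(x)*count_u(y) for x != y.
--     counters = []
--     N = {}
--     for user, items in train.items():
--         c = {}
--         for it in items:
--             c[it] = c.get(it, 0) + 1
--             N[it] = N.get(it, 0) + 1
--         counters.append(c)
--     w = {x: {y: 0 if y == x else sum(c.get(x, 0) * c.get(y, 0) for c in counters)
--              for y in totl_items}
--          for x in totl_items}
--     return w, N
-- ===== Notes on version B (the rewrite author's own statement) =====
-- stated objective: alternative
-- what changed: B replaces A's in-place matrix updates entirely: one pass over users builds per-user count dicts and the global frequency dict N, and the co-occurrence matrix is then constructed directly in closed form as w[x][y] = sum over users of count_u(x)*count_u(y) for x != y (0 on the diagonal), instead of A's dense zero init followed by per-occurrence nested +1 increments.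
-- outside the precondition, e.g. on mangli({'u': ['a', 'b']}, ['a']): A raises KeyError, B returns ({'a': {'a': 0}}, {'a': 1, 'b': 1})
import Mathlib
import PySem

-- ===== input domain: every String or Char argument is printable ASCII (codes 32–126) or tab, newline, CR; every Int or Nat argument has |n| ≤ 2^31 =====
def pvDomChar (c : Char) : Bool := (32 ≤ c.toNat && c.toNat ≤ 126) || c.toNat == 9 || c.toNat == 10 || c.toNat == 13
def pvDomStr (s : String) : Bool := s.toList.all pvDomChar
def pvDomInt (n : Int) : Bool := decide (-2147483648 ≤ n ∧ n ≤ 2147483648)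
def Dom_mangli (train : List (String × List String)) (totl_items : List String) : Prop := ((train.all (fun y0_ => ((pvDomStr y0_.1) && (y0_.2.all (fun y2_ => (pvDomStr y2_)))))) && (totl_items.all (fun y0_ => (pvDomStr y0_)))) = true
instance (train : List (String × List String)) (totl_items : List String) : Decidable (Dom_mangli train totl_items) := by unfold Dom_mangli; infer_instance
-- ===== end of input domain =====

-- B replaces A's in-place matrix updates: one pass over users builds per-user count dicts and the
-- global frequencies N, then w is constructed directly in closed form (w[x][y] = Σ_u cnt_u(x)*cnt_u(y)
-- for x ≠ y, 0 on the diagonal) instead of A's dense zero init plus per-occurrence nested +1 loops.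

-- Both ports read the dict argument `train` as Python's dict(train): a later duplicate key overwrites in place.
def trainDict (train : List (String × List String)) : PySem.Dict String (List String) :=
  train.foldl (fun d p => d.insert p.1 p.2) PySem.Dict.empty

-- ===== PORT A =====
def mangli (train : List (String × List String)) (totl_items : List String) : (List (String × List (String × Int))) × (List (String × Int)) :=
  let w : PySem.Dict String (PySem.Dict String Int) :=
    totl_items.foldl (fun w item =>
      totl_items.foldl (fun w item_ =>
        w.modify item PySem.Dict.empty (fun row => row.insert item_ 0))
        (w.insert item PySem.Dict.empty)) PySem.Dict.empty
  let wN :=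
    (trainDict train).items.foldl (fun wN ui =>
      ui.2.foldl (fun wN item =>
        let N := if wN.2.contains item then wN.2 else wN.2.insert item 0
        let N := N.modify item 0 (· + 1)
        let w := ui.2.foldl (fun w item_ =>
          if item_ ≠ item then
            w.modify item PySem.Dict.empty (fun row => row.modify item_ 0 (· + 1))
          else w) wN.1
        (w, N)) wN)
      (w, (PySem.Dict.empty : PySem.Dict String Int))
  (wN.1.items.map (fun p => (p.1, p.2.items)), wN.2.items)

-- ===== PORT B =====
def mangli_alt (train : List (String × List String)) (totl_items : List String) : (List (String × List (String × Int))) × (List (String × Int)) :=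
  let cN :=
    (trainDict train).items.foldl
      (fun (cN : List (PySem.Dict String Int) × PySem.Dict String Int) ui =>
        let cn := ui.2.foldl
          (fun (cn : PySem.Dict String Int × PySem.Dict String Int) it =>
            (cn.1.insert it (cn.1.getD it 0 + 1), cn.2.insert it (cn.2.getD it 0 + 1)))
          (PySem.Dict.empty, cN.2)
        (cN.1 ++ [cn.1], cn.2))
      ([], (PySem.Dict.empty : PySem.Dict String Int))
  let w : PySem.Dict String (PySem.Dict String Int) :=
    totl_items.foldl (fun w x =>
      w.insert x (totl_items.foldl (fun row y =>
        row.insert y (if y = x then 0 else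
          (cN.1.map (fun c => c.getD x 0 * c.getD y 0)).sum)) PySem.Dict.empty))
      PySem.Dict.empty
  (w.items.map (fun p => (p.1, p.2.items)), cN.2.items)

-- ===== PRECONDITION & SPEC =====
-- Pre_ excludes exactly the inputs on which A raises KeyError: some user list of dict(train) with two
-- distinct item values contains an item outside totl_items, so `w[item][item_] += 1` hits a missing key.
def Pre_mangli (train : List (String × List String)) (totl_items : List String) : Prop :=
  ∀ p ∈ (trainDict train).items,
    (∀ x ∈ p.2, ∀ y ∈ p.2, x = y) ∨ (∀ x ∈ p.2, x ∈ totl_items)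
instance (train : List (String × List String)) (totl_items : List String) : Decidable (Pre_mangli train totl_items) := by unfold Pre_mangli; infer_instance
def pvWitness_mangli : (List (String × List String)) × List String := ([("u", ["a", "b"])], ["a", "b"])

def Spec_mangli (train : List (String × List String)) (totl_items : List String) (out : (List (String × List (String × Int))) × (List (String × Int))) : Prop := out = mangli_alt train totl_items
instance (train : List (String × List String)) (totl_items : List String) (out : (List (String × List (String × Int))) × (List (String × Int))) : Decidable (Spec_mangli train totl_items out) := by unfold Spec_mangli; infer_instance

-- ===== CLAIM (what is proved, stated in full; the proofs are below) =====
def Claim_equal_mangli : Prop := ∀ (train : List (String × List String)) (totl_items : List String), Dom_mangli train totl_items → Pre_mangli train totl_items → Spec_mangli train totl_items (mangli train totl_items)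

-- ===== LEMMAS AND PROOFS =====

-- value/structure views used by the proofs
def pvVal (w : PySem.Dict String (PySem.Dict String Int)) (x y : String) : Int :=
  (w.getD x PySem.Dict.empty).getD y 0

def pvBump (w : PySem.Dict String (PySem.Dict String Int)) (x y : String) (c : Int) :
    PySem.Dict String (PySem.Dict String Int) :=
  w.modify x PySem.Dict.empty (fun row => row.modify y 0 (· + c))

def pvInv (totl : List String) (w : PySem.Dict String (PySem.Dict String Int)) : Prop :=
  w.keys = PySem.Set.ofList totl ∧
    ∀ x ∈ PySem.Set.ofList totl, (w.getD x PySem.Dict.empty).keys = PySem.Set.ofList totl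

-- closed form: total pairwise weight contributed by all users
def pvSA (users : List (String × List String)) (x y : String) : Int :=
  (users.map (fun ui => (ui.2.count x : Int) * (ui.2.count y : Int))).sum

lemma pv_foldl_pres {α β : Type} {P : α → Prop} (f : α → β → α) :
    ∀ (l : List β), (∀ a b, b ∈ l → P a → P (f a b)) → ∀ a, P a → P (l.foldl f a) := by
  intro l
  induction l with
  | nil => intro _ a h; simpa using h
  | cons b t ih =>
    intro h a ha
    simp only [List.foldl_cons]
    exact ih (fun a' b' hb' => h a' b' (List.mem_cons_of_mem _ hb')) _ (h a b (List.mem_cons_self) ha)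

lemma pv_modify_insert_self {ν : Type} (d : PySem.Dict String ν) (k : String) (v d0 : ν) (f : ν → ν) :
    (d.insert k v).modify k d0 f = d.insert k (f v) := by
  rw [PySem.Dict.modify, PySem.Dict.getD_insert_self, PySem.Dict.insert_insert_self]

lemma pv_init_row (l : List String) :
    ∀ (w : PySem.Dict String (PySem.Dict String Int)) (k : String) (z : PySem.Dict String Int),
    l.foldl (fun w i => w.modify k PySem.Dict.empty (fun row => row.insert i 0)) (w.insert k z)
      = w.insert k (l.foldl (fun d i => d.insert i 0) z) := by
  induction l with
  | nil => intro w k z; simp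
  | cons i t ih =>
    intro w k z
    simp only [List.foldl_cons, pv_modify_insert_self]
    exact ih w k (z.insert i 0)

lemma pv_getD_foldl_insert_fun {ν : Type} (l : List String) (f : String → ν) (dflt : ν) :
    ∀ (d : PySem.Dict String ν) (x : String),
    (l.foldl (fun d k => d.insert k (f k)) d).getD x dflt = if x ∈ l then f x else d.getD x dflt := by
  induction l with
  | nil => intro d x; simp
  | cons k t ih =>
    intro d x
    simp only [List.foldl_cons, ih, PySem.Dict.getD_insert, List.mem_cons]
    by_cases hx : x ∈ t <;> by_cases hk : x = k <;> simp [hx, hk]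

lemma pv_val_bump (w : PySem.Dict String (PySem.Dict String Int)) (a b x y : String) (c : Int) :
    pvVal (pvBump w a b c) x y = if x = a ∧ y = b then pvVal w x y + c else pvVal w x y := by
  simp only [pvVal, pvBump, PySem.Dict.getD_modify]
  by_cases hx : x = a <;> by_cases hy : y = b <;> simp [hx, hy, PySem.Dict.getD_modify]

lemma pv_Inv_bump (totl : List String) (w : PySem.Dict String (PySem.Dict String Int))
    (x y : String) (c : Int) (h : pvInv totl w) (hx : x ∈ totl) (hy : y ∈ totl) :
    pvInv totl (pvBump w x y c) := by
  have hx' : x ∈ PySem.Set.ofList totl := (PySem.Set.mem_ofList totl x).mpr hx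
  have hy' : y ∈ PySem.Set.ofList totl := (PySem.Set.mem_ofList totl y).mpr hy
  have hcw : w.contains x = true := (PySem.Dict.contains_iff_mem_keys w x).mpr (h.1 ▸ hx')
  constructor
  · rw [pvBump, PySem.Dict.modify, PySem.Dict.keys_insert_of_contains _ _ hcw, h.1]
  · intro x' hx'mem
    rw [pvBump, PySem.Dict.modify, PySem.Dict.getD_insert]
    by_cases hxx : x' = x
    · subst hxx
      have hrow := h.2 x' hx'mem
      have hcr : (w.getD x' PySem.Dict.empty).contains y = true :=
        (PySem.Dict.contains_iff_mem_keys _ y).mpr (hrow ▸ hy')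
      rw [if_pos rfl]
      simp only [PySem.Dict.modify]
      rw [PySem.Dict.keys_insert_of_contains _ _ hcr, hrow]
    · rw [if_neg hxx]; exact h.2 x' hx'mem

lemma pv_val_inner {α : Type} (l : List α) (key : α → String) (amt : α → Int) (a x y : String) :
    ∀ w, pvVal (l.foldl (fun w e => if key e ≠ a then pvBump w a (key e) (amt e) else w) w) x y
      = pvVal w x y + (if x = a ∧ y ≠ a then ((l.filter (fun e => key e == y)).map amt).sum else 0) := by
  induction l with
  | nil => intro w; simp
  | cons e t ih =>
    intro w
    simp only [List.foldl_cons, ih, List.filter_cons]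
    by_cases he : key e = a
    · rw [if_neg (show ¬ key e ≠ a from fun h => h he)]
      by_cases h1 : x = a ∧ y ≠ a
      · obtain ⟨rfl, hya⟩ := h1
        rw [if_pos (show x = x ∧ y ≠ x from ⟨rfl, hya⟩),
          if_pos (show x = x ∧ y ≠ x from ⟨rfl, hya⟩),
          if_neg (show ¬ (key e == y) = true by
            simp only [beq_iff_eq]; exact fun h => hya (h.symm.trans he))]
      · rw [if_neg h1, if_neg h1]
    · rw [if_pos (show key e ≠ a from he), pv_val_bump]
      by_cases h1 : x = a ∧ y ≠ a
      · obtain ⟨rfl, hya⟩ := h1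
        by_cases hey : y = key e
        · subst hey
          rw [if_pos (show x = x ∧ key e = key e from ⟨rfl, rfl⟩),
            if_pos (show x = x ∧ key e ≠ x from ⟨rfl, hya⟩),
            if_pos (show x = x ∧ key e ≠ x from ⟨rfl, hya⟩),
            if_pos (show (key e == key e) = true by simp)]
          simp only [List.map_cons, List.sum_cons]
          ring
        · rw [if_neg (show ¬ (x = x ∧ y = key e) from fun h => hey h.2),
            if_pos (show x = x ∧ y ≠ x from ⟨rfl, hya⟩),
            if_pos (show x = x ∧ y ≠ x from ⟨rfl, hya⟩),
            if_neg (show ¬ (key e == y) = true by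
              simp only [beq_iff_eq]; exact fun h => hey h.symm)]
      · rw [if_neg (show ¬ (x = a ∧ y = key e) from
            fun h => h1 ⟨h.1, fun hya => he (h.2.symm.trans hya)⟩),
          if_neg h1, if_neg h1]

lemma pv_val_outer {α : Type} (l : List α) (key : α → String) (amt : α → Int) (c0 : Int)
    (g : PySem.Dict String (PySem.Dict String Int) → α → PySem.Dict String (PySem.Dict String Int))
    (x y : String)
    (hg : ∀ w e, e ∈ l → pvVal (g w e) x y
        = pvVal w x y + (if x = key e ∧ y ≠ key e then amt e * c0 else 0)) :
    ∀ w, pvVal (l.foldl g w) x y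
      = pvVal w x y + (if x ≠ y then ((l.filter (fun e => key e == x)).map amt).sum * c0 else 0) := by
  induction l with
  | nil => intro w; simp
  | cons e t ih =>
    intro w
    simp only [List.foldl_cons, List.filter_cons]
    rw [ih (fun w e he => hg w e (List.mem_cons_of_mem _ he)), hg w e (List.mem_cons_self)]
    by_cases hxy : x = y
    · rw [if_neg (show ¬ x ≠ y from fun h => h hxy),
        if_neg (show ¬ x ≠ y from fun h => h hxy),
        if_neg (show ¬ (x = key e ∧ y ≠ key e) from fun h => h.2 (hxy ▸ h.1))]
      ring
    · rw [if_pos (show x ≠ y from hxy), if_pos (show x ≠ y from hxy)]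
      by_cases hex : key e = x
      · rw [if_pos (show x = key e ∧ y ≠ key e from
            ⟨hex.symm, fun h => hxy ((h.trans hex).symm)⟩),
          if_pos (show (key e == x) = true by simp [hex])]
        simp only [List.map_cons, List.sum_cons]
        ring
      · rw [if_neg (show ¬ (x = key e ∧ y ≠ key e) from fun h => hex h.1.symm),
          if_neg (show ¬ (key e == x) = true by simp [hex])]
        ring

lemma pv_sum_ones (l : List String) (y : String) :
    ((l.filter (fun e => e == y)).map (fun _ => (1 : Int))).sum = (l.count y : Int) := by
  induction l with
  | nil => simp
  | cons a t ih =>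
    simp only [List.filter_cons, List.count_cons]
    by_cases ha : a = y <;> subst_eqs <;> simp_all <;> omega

-- per-user value change of A's w loop: closed form count x * count y
lemma pv_valA_user (items : List String) (x y : String)
    (w : PySem.Dict String (PySem.Dict String Int)) :
    pvVal (items.foldl (fun w item => items.foldl (fun w item_ =>
        if item_ ≠ item then pvBump w item item_ 1 else w) w) w) x y
      = pvVal w x y + (if x ≠ y then (items.count x : Int) * (items.count y : Int) else 0) := by
  have h := pv_val_outer (l := items) (key := fun e => e) (amt := fun _ => (1 : Int))
    (c0 := (items.count y : Int))
    (g := fun w item => items.foldl (fun w item_ =>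
      if item_ ≠ item then pvBump w item item_ 1 else w) w) x y
    (fun w e _ => by
      rw [pv_val_inner items (fun e => e) (fun _ => (1 : Int)) e x y w, pv_sum_ones]
      by_cases h1 : x = e ∧ y ≠ e <;> simp [h1]) w
  rw [h, pv_sum_ones]

-- key-structure preservation of A's per-user w loop
lemma pv_InvA_user (totl items : List String) (hsub : ∀ z ∈ items, z ∈ totl)
    (w : PySem.Dict String (PySem.Dict String Int)) (h : pvInv totl w) :
    pvInv totl (items.foldl (fun w item => items.foldl (fun w item_ =>
        if item_ ≠ item then pvBump w item item_ 1 else w) w) w) := by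
  refine pv_foldl_pres _ items (fun w item hitem hw => ?_) w h
  refine pv_foldl_pres _ items (fun w item_ hitem_ hw' => ?_) w hw
  by_cases hne : item_ ≠ item
  · rw [if_pos hne]
    exact pv_Inv_bump totl w item item_ 1 hw' (hsub item hitem) (hsub item_ hitem_)
  · rw [if_neg hne]; exact hw'

-- when all of a user's items are equal, A's w loop changes nothing
lemma pv_wA_user_id (items : List String) (hall : ∀ z ∈ items, ∀ z' ∈ items, z = z')
    (w : PySem.Dict String (PySem.Dict String Int)) :
    items.foldl (fun w item => items.foldl (fun w item_ =>
        if item_ ≠ item then pvBump w item item_ 1 else w) w) w = w := by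
  rw [PySem.List.foldl_congr_mem _ _ (fun acc _ => acc) _ (fun acc item hitem => by
    rw [PySem.List.foldl_congr_mem _ _ (fun acc _ => acc) _ (fun acc' item_ hitem_ => by
      rw [if_neg (show ¬ item_ ≠ item from fun hne => hne (hall item_ hitem_ item hitem))]),
      PySem.List.foldl_ignore]),
    PySem.List.foldl_ignore]

-- two matrices with the invariant and equal values on totl × totl are equal
lemma pv_w_ext (totl : List String) (wA wB : PySem.Dict String (PySem.Dict String Int))
    (hA : pvInv totl wA) (hB : pvInv totl wB)
    (hv : ∀ x ∈ PySem.Set.ofList totl, ∀ y ∈ PySem.Set.ofList totl, pvVal wA x y = pvVal wB x y) :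
    wA = wB := by
  apply PySem.Dict.ext
  have hndA : wA.keys.Nodup := hA.1 ▸ PySem.Set.nodup_ofList totl
  have hndB : wB.keys.Nodup := hB.1 ▸ PySem.Set.nodup_ofList totl
  rw [PySem.Dict.items_eq_map_keys wA hndA PySem.Dict.empty,
    PySem.Dict.items_eq_map_keys wB hndB PySem.Dict.empty, hA.1, hB.1]
  apply List.map_congr_left
  intro k hk
  have hrow : wA.getD k PySem.Dict.empty = wB.getD k PySem.Dict.empty := by
    apply PySem.Dict.ext
    have hkA := hA.2 k hk
    have hkB := hB.2 k hk
    rw [PySem.Dict.items_eq_map_keys _ (hkA ▸ PySem.Set.nodup_ofList totl) 0,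
      PySem.Dict.items_eq_map_keys _ (hkB ▸ PySem.Set.nodup_ofList totl) 0, hkA, hkB]
    apply List.map_congr_left
    intro k' hk'
    exact congrArg _ (hv k hk k' hk')
  rw [hrow]

-- A's dense init equals the direct fold of constant-zero rows
lemma pv_initA_eq (totl : List String) :
    totl.foldl (fun w item =>
      totl.foldl (fun w item_ =>
        w.modify item PySem.Dict.empty (fun row => row.insert item_ 0))
        (w.insert item PySem.Dict.empty))
      (PySem.Dict.empty : PySem.Dict String (PySem.Dict String Int))
      = totl.foldl (fun w x =>
          w.insert x (totl.foldl (fun d i => d.insert i 0) PySem.Dict.empty))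
          PySem.Dict.empty := by
  exact PySem.List.foldl_congr_mem _ _ _ _ (fun acc item _ => pv_init_row totl acc item PySem.Dict.empty)

lemma pv_keys_foldl_insert_fun {ν : Type} (l : List String) (f : String → ν) :
    (l.foldl (fun d k => d.insert k (f k)) (PySem.Dict.empty : PySem.Dict String ν)).keys
      = PySem.Set.ofList l := by
  have := PySem.Dict.keys_foldl_insert l (fun _ k => f k) PySem.Dict.empty
  simpa [PySem.Set.ofList] using this

-- any matrix built as a fold of per-key rows with keys totl satisfies the key invariant
lemma pv_Inv_wB (totl : List String) (f : String → PySem.Dict String Int)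
    (hrows : ∀ x, (f x).keys = PySem.Set.ofList totl) :
    pvInv totl (totl.foldl (fun w x => w.insert x (f x)) PySem.Dict.empty) := by
  constructor
  · exact pv_keys_foldl_insert_fun totl f
  · intro x hx
    rw [pv_getD_foldl_insert_fun, if_pos ((PySem.Set.mem_ofList totl x).mp hx)]
    exact hrows x

-- value of a matrix built as a fold of row folds
lemma pv_val_wB (totl : List String) (v : String → String → Int) (x y : String) :
    pvVal (totl.foldl (fun w x =>
        w.insert x (totl.foldl (fun row y => row.insert y (v x y)) PySem.Dict.empty))
        PySem.Dict.empty) x y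
      = if x ∈ totl then (if y ∈ totl then v x y else 0) else 0 := by
  rw [pvVal, pv_getD_foldl_insert_fun]
  by_cases hx : x ∈ totl
  · rw [if_pos hx, if_pos hx, pv_getD_foldl_insert_fun]
    by_cases hy : y ∈ totl <;> simp [hy]
  · rw [if_neg hx, if_neg hx]
    simp

-- splitting the (w, N) pair state of A's per-user loop into two independent folds
lemma pv_pairA (l full : List String) :
    ∀ (w : PySem.Dict String (PySem.Dict String Int)) (N : PySem.Dict String Int),
    l.foldl (fun wN item =>
        (full.foldl (fun w item_ =>
           if item_ ≠ item then
             w.modify item PySem.Dict.empty (fun row => row.modify item_ 0 (· + 1))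
           else w) wN.1,
         (if wN.2.contains item then wN.2 else wN.2.insert item 0).modify item 0 (· + 1))) (w, N)
      = (l.foldl (fun w item => full.foldl (fun w item_ =>
            if item_ ≠ item then pvBump w item item_ 1 else w) w) w,
         l.foldl (fun N item =>
            (if N.contains item then N else N.insert item 0).modify item 0 (· + 1)) N) := by
  induction l with
  | nil => intro w N; rfl
  | cons a t ih => intro w N; exact ih _ _

-- user-level split of A's pair fold
lemma pv_splitA (users : List (String × List String)) :
    ∀ (w : PySem.Dict String (PySem.Dict String Int)) (N : PySem.Dict String Int),
    users.foldl (fun wN ui =>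
      ui.2.foldl (fun wN item =>
        (ui.2.foldl (fun w item_ =>
           if item_ ≠ item then
             w.modify item PySem.Dict.empty (fun row => row.modify item_ 0 (· + 1))
           else w) wN.1,
         (if wN.2.contains item then wN.2 else wN.2.insert item 0).modify item 0 (· + 1))) wN) (w, N)
      = (users.foldl (fun w ui => ui.2.foldl (fun w item => ui.2.foldl (fun w item_ =>
            if item_ ≠ item then pvBump w item item_ 1 else w) w) w) w,
         users.foldl (fun N ui => ui.2.foldl (fun N item =>
            (if N.contains item then N else N.insert item 0).modify item 0 (· + 1)) N) N) := by
  induction users with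
  | nil => intro w N; rfl
  | cons u us ih =>
    intro w N
    simp only [List.foldl_cons]
    rw [pv_pairA u.2 u.2 w N]
    exact ih _ _

-- splitting B's per-user (counter, N) pair fold
lemma pv_pairB_inner (items : List String) :
    ∀ (c N : PySem.Dict String Int),
    items.foldl (fun cn it =>
        (cn.1.insert it (cn.1.getD it 0 + 1), cn.2.insert it (cn.2.getD it 0 + 1))) (c, N)
      = (items.foldl (fun c it => c.insert it (c.getD it 0 + 1)) c,
         items.foldl (fun N it => N.insert it (N.getD it 0 + 1)) N) := by
  induction items with
  | nil => intro c N; rfl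
  | cons a t ih => intro c N; exact ih _ _

-- user-level split of B's fold: counters component and N component
lemma pv_splitB (users : List (String × List String)) :
    ∀ (cs : List (PySem.Dict String Int)) (N : PySem.Dict String Int),
    users.foldl (fun cN ui =>
      (cN.1 ++ [(ui.2.foldl (fun cn it =>
          (cn.1.insert it (cn.1.getD it 0 + 1), cn.2.insert it (cn.2.getD it 0 + 1)))
          ((PySem.Dict.empty : PySem.Dict String Int), cN.2)).1],
       (ui.2.foldl (fun cn it =>
          (cn.1.insert it (cn.1.getD it 0 + 1), cn.2.insert it (cn.2.getD it 0 + 1)))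
          ((PySem.Dict.empty : PySem.Dict String Int), cN.2)).2)) (cs, N)
      = (cs ++ users.map (fun ui => PySem.Dict.counter ui.2),
         users.foldl (fun N ui => ui.2.foldl (fun N it => N.insert it (N.getD it 0 + 1)) N) N) := by
  induction users with
  | nil => intro cs N; simp
  | cons u us ih =>
    intro cs N
    simp only [List.foldl_cons, List.map_cons]
    rw [pv_pairB_inner u.2 PySem.Dict.empty N]
    simp only [PySem.Dict.foldl_insert_getD_add_one_eq_counter]
    rw [ih (cs ++ [PySem.Dict.counter u.2]) _, List.append_assoc]
    rfl

-- A's N step is a plain insert-getD-add-one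
lemma pv_stepN_eq (N : PySem.Dict String Int) (item : String) :
    (if N.contains item then N else N.insert item 0).modify item 0 (· + 1)
      = N.insert item (N.getD item 0 + 1) := by
  by_cases hc : N.contains item
  · rw [if_pos hc]; rfl
  · rw [if_neg hc, pv_modify_insert_self,
      PySem.Dict.getD_of_not_contains _ _ (by simpa using hc)]

-- the two N folds agree
lemma pv_N_eq (users : List (String × List String)) :
    ∀ (N : PySem.Dict String Int), users.foldl (fun N ui => ui.2.foldl (fun N item =>
          (if N.contains item then N else N.insert item 0).modify item 0 (· + 1)) N) N
       = users.foldl (fun N ui => ui.2.foldl (fun N it => N.insert it (N.getD it 0 + 1)) N) N := by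
  induction users with
  | nil => intro N; rfl
  | cons u us ih =>
    intro N
    simp only [List.foldl_cons]
    rw [PySem.List.foldl_congr_mem _ _ (fun N it => N.insert it (N.getD it 0 + 1)) _
      (fun acc item _ => pv_stepN_eq acc item), ih]

-- A's w fold over all users: closed-form value
lemma pv_valA_total (users : List (String × List String)) (x y : String) :
    ∀ w, pvVal (users.foldl (fun w ui => ui.2.foldl (fun w item => ui.2.foldl (fun w item_ =>
        if item_ ≠ item then pvBump w item item_ 1 else w) w) w) w) x y
      = pvVal w x y + (if x ≠ y then pvSA users x y else 0) := by
  induction users with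
  | nil => intro w; simp [pvSA]
  | cons u us ih =>
    intro w
    simp only [List.foldl_cons]
    rw [ih, pv_valA_user]
    simp only [pvSA, List.map_cons, List.sum_cons]
    by_cases hxy : x ≠ y <;> simp [hxy] <;> ring

-- A's w fold over all users preserves the key invariant (using Pre_ per user)
lemma pv_InvA_total (totl : List String) (users : List (String × List String))
    (hpre : ∀ ui ∈ users, (∀ a ∈ ui.2, ∀ b ∈ ui.2, a = b) ∨ (∀ a ∈ ui.2, a ∈ totl))
    (w : PySem.Dict String (PySem.Dict String Int)) (h : pvInv totl w) :
    pvInv totl (users.foldl (fun w ui => ui.2.foldl (fun w item => ui.2.foldl (fun w item_ =>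
        if item_ ≠ item then pvBump w item item_ 1 else w) w) w) w) := by
  refine pv_foldl_pres _ users (fun w ui hui hw => ?_) w h
  rcases hpre ui hui with hall | hsub
  · rw [pv_wA_user_id ui.2 hall w]; exact hw
  · exact pv_InvA_user totl ui.2 hsub w hw

-- B's sum over counters equals the closed form over raw counts
lemma pv_Sm_eq_SA (users : List (String × List String)) (x y : String) :
    ((users.map (fun ui => PySem.Dict.counter ui.2)).map
        (fun c => c.getD x 0 * c.getD y 0)).sum = pvSA users x y := by
  rw [List.map_map, pvSA]
  apply congrArg List.sum
  apply List.map_congr_left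
  intro ui _
  simp [PySem.Dict.getD_counter]

-- ===== VERDICT (by name: the statement is the Claim_ definition above) =====
theorem mangli_spec : Claim_equal_mangli := by
  intro train totl _ hpre
  unfold Spec_mangli
  show (((trainDict train).items.foldl (fun wN ui =>
        ui.2.foldl (fun wN item =>
          (ui.2.foldl (fun w item_ =>
             if item_ ≠ item then
               w.modify item PySem.Dict.empty (fun row => row.modify item_ 0 (· + 1))
             else w) wN.1,
           (if wN.2.contains item then wN.2 else wN.2.insert item 0).modify item 0 (· + 1))) wN)
      (totl.foldl (fun w item =>
        totl.foldl (fun w item_ =>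
          w.modify item PySem.Dict.empty (fun row => row.insert item_ 0))
          (w.insert item PySem.Dict.empty))
        (PySem.Dict.empty : PySem.Dict String (PySem.Dict String Int)),
       (PySem.Dict.empty : PySem.Dict String Int))).1.items.map (fun p => (p.1, p.2.items)),
      ((trainDict train).items.foldl (fun wN ui =>
        ui.2.foldl (fun wN item =>
          (ui.2.foldl (fun w item_ =>
             if item_ ≠ item then
               w.modify item PySem.Dict.empty (fun row => row.modify item_ 0 (· + 1))
             else w) wN.1,
           (if wN.2.contains item then wN.2 else wN.2.insert item 0).modify item 0 (· + 1))) wN)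
      (totl.foldl (fun w item =>
        totl.foldl (fun w item_ =>
          w.modify item PySem.Dict.empty (fun row => row.insert item_ 0))
          (w.insert item PySem.Dict.empty))
        (PySem.Dict.empty : PySem.Dict String (PySem.Dict String Int)),
       (PySem.Dict.empty : PySem.Dict String Int))).2.items)
    = (((totl.foldl (fun w x =>
          w.insert x (totl.foldl (fun row y =>
            row.insert y (if y = x then 0 else
              ((((trainDict train).items.foldl (fun cN ui =>
                  ((cN.1 ++ [(ui.2.foldl (fun cn it =>
                      (cn.1.insert it (cn.1.getD it 0 + 1), cn.2.insert it (cn.2.getD it 0 + 1)))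
                      ((PySem.Dict.empty : PySem.Dict String Int), cN.2)).1]),
                   (ui.2.foldl (fun cn it =>
                      (cn.1.insert it (cn.1.getD it 0 + 1), cn.2.insert it (cn.2.getD it 0 + 1)))
                      ((PySem.Dict.empty : PySem.Dict String Int), cN.2)).2))
                  (([] : List (PySem.Dict String Int)), (PySem.Dict.empty : PySem.Dict String Int))).1).map
                (fun c => c.getD x 0 * c.getD y 0)).sum)) PySem.Dict.empty))
          (PySem.Dict.empty : PySem.Dict String (PySem.Dict String Int))).items.map
        (fun p => (p.1, p.2.items))),
      ((trainDict train).items.foldl (fun cN ui =>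
          ((cN.1 ++ [(ui.2.foldl (fun cn it =>
              (cn.1.insert it (cn.1.getD it 0 + 1), cn.2.insert it (cn.2.getD it 0 + 1)))
              ((PySem.Dict.empty : PySem.Dict String Int), cN.2)).1]),
           (ui.2.foldl (fun cn it =>
              (cn.1.insert it (cn.1.getD it 0 + 1), cn.2.insert it (cn.2.getD it 0 + 1)))
              ((PySem.Dict.empty : PySem.Dict String Int), cN.2)).2))
          (([] : List (PySem.Dict String Int)), (PySem.Dict.empty : PySem.Dict String Int))).2.items)
  rw [pv_initA_eq totl, pv_splitA, pv_splitB]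
  simp only [List.nil_append]
  have hw : ((trainDict train).items.foldl (fun w ui => ui.2.foldl (fun w item =>
        ui.2.foldl (fun w item_ => if item_ ≠ item then pvBump w item item_ 1 else w) w) w)
        (totl.foldl (fun w x =>
          w.insert x (totl.foldl (fun d i => d.insert i 0) PySem.Dict.empty)) PySem.Dict.empty))
      = totl.foldl (fun w x =>
          w.insert x (totl.foldl (fun row y =>
            row.insert y (if y = x then 0 else
              (((trainDict train).items.map (fun ui => PySem.Dict.counter ui.2)).map
                (fun c => c.getD x 0 * c.getD y 0)).sum)) PySem.Dict.empty)) PySem.Dict.empty := by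
    refine pv_w_ext totl _ _ ?_ ?_ ?_
    · exact pv_InvA_total totl _ hpre _ (pv_Inv_wB totl _ (fun x => pv_keys_foldl_insert_fun totl _))
    · exact pv_Inv_wB totl _ (fun x => pv_keys_foldl_insert_fun totl _)
    intro x hx y hy
    rw [pv_valA_total, pv_val_wB totl (fun _ _ => 0), pv_val_wB]
    rw [if_pos ((PySem.Set.mem_ofList totl x).mp hx), if_pos ((PySem.Set.mem_ofList totl y).mp hy),
      if_pos ((PySem.Set.mem_ofList totl x).mp hx), if_pos ((PySem.Set.mem_ofList totl y).mp hy)]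
    rw [pv_Sm_eq_SA]
    by_cases hxy : x = y
    · simp [hxy]
    · simp [hxy, Ne.symm hxy]
  rw [hw, pv_N_eq]
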